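-- pv_equiv track=rewrite | github.com/frozenfrank/watersort | personal/watersort.py | analyzeCounterDictionary
-- ===== SOURCE A (Python) =====
-- from collections import deque, defaultdict
--
-- def analyzeCounterDictionary(dict: defaultdict[int]) -> tuple[int, int, int]: # (min, max, mode, total)
--   minKey = min(dict.keys())
--   maxKey = max(dict.keys())
--   totalOccurrences = sum(dict.values())
--
--   # Compute mode
--   modeKey = None
--   modeKeyOccurrences = 0
--   for key, occurrences in dict.items():
--     if occurrences > modeKeyOccurrences:
--       modeKey = key
--       modeKeyOccurrences = occurrences
--
--   return (minKey, maxKey, modeKey, totalOccurrences)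
-- ===== SOURCE B (Python) =====
-- # B: one fused pass over items with explicit accumulators, instead of A's three
-- # library reductions (min, max, sum) plus a separate mode loop. Same cost class.
-- def analyzeCounterDictionary(dict):
--   items = list(dict.items())
--   first = items[0][0]          # IndexError on empty dict (A raises ValueError there)
--   minKey = first
--   maxKey = first
--   modeKey = first
--   modeKeyOccurrences = 0
--   totalOccurrences = 0
--   for key, occurrences in items:
--     if key < minKey:
--       minKey = key
--     if key > maxKey:
--       maxKey = key
--     if occurrences > modeKeyOccurrences:
--       modeKey = key
--       modeKeyOccurrences = occurrences
--     totalOccurrences += occurrences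
--   return (minKey, maxKey, modeKey, totalOccurrences)
-- ===== Notes on version B (the rewrite author's own statement) =====
-- stated objective: alternative
-- what changed: A's three library reductions (min, max, sum over the whole dict) plus a separate mode loop are replaced by one fused pass that carries minKey/maxKey/modeKey/total in a single explicit accumulator initialized from the first item.
-- outside the precondition, e.g. on analyzeCounterDictionary({1: 0}): A returns (1, 1, None, 0), B returns (1, 1, 1, 0)
import Mathlib
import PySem

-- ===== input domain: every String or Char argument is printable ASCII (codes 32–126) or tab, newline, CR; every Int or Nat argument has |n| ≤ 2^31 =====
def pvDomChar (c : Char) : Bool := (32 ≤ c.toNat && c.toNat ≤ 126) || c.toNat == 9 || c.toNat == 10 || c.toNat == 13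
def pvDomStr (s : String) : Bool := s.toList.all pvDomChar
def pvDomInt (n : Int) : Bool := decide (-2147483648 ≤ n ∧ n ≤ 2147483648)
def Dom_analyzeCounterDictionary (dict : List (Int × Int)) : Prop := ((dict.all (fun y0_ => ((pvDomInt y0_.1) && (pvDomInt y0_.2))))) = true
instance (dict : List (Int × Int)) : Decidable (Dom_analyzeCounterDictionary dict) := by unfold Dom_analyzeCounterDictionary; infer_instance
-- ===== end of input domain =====

-- B replaces A's three library reductions (min, max, sum) plus a separate mode loop by
-- one fused pass with explicit accumulators; return value only (no mutation involved).

-- ===== PORT A =====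
-- helper: one step of A's mode loop (modeKey is Optional: starts as None)
def pvAmf (s : Option Int × Int) (kv : Int × Int) : Option Int × Int :=
  if kv.2 > s.2 then (some kv.1, kv.2) else s

-- A: minKey = min(keys), maxKey = max(keys), total = sum(values), then a loop computing
-- the first strict-greater mode starting from modeKey = None, modeKeyOccurrences = 0.
def analyzeCounterDictionary (dict : List (Int × Int)) : Int × Int × Int × Int :=
  match PySem.List.min? (dict.map Prod.fst) (fun x => x),
        PySem.List.max? (dict.map Prod.fst) (fun x => x) with
  | some minKey, some maxKey =>
    let totalOccurrences := (dict.map Prod.snd).sum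
    let st := dict.foldl pvAmf (none, 0)
    -- modeKey is None only when every occurrence ≤ 0 (excluded by Pre_); .getD 0 stands for that non-int value
    (minKey, maxKey, st.1.getD 0, totalOccurrences)
  | _, _ => (0, 0, 0, 0)  -- empty dict: Python's min raises ValueError (excluded by Pre_)

-- ===== PORT B =====
-- helper: one step of B's fused loop over (minKey, maxKey, modeKey, modeOcc, total)
def pvBstep (s : Int × Int × Int × Int × Int) (kv : Int × Int) : Int × Int × Int × Int × Int :=
  (if kv.1 < s.1 then kv.1 else s.1,
   if kv.1 > s.2.1 then kv.1 else s.2.1,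
   (if kv.2 > s.2.2.2.1 then (kv.1, kv.2) else (s.2.2.1, s.2.2.2.1)).1,
   (if kv.2 > s.2.2.2.1 then (kv.1, kv.2) else (s.2.2.1, s.2.2.2.1)).2,
   s.2.2.2.2 + kv.2)

-- B: items[0] (IndexError on empty dict, excluded by Pre_), then one fold carrying
-- (minKey, maxKey, modeKey, modeKeyOccurrences, totalOccurrences).
def analyzeCounterDictionary_alt (dict : List (Int × Int)) : Int × Int × Int × Int :=
  match dict with
  | [] => (0, 0, 0, 0)  -- items[0] raises IndexError (excluded by Pre_)
  | (first, _) :: _ =>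
    let st := dict.foldl pvBstep (first, first, first, 0, 0)
    (st.1, st.2.1, st.2.2.1, st.2.2.2.2)

-- ===== PRECONDITION & SPEC =====
-- Pre_ excludes: the empty dict (A's min raises ValueError, B's items[0] raises IndexError);
-- dicts whose occurrence counts are all ≤ 0, on which A returns None as modeKey — not an int
-- of the declared tuple type; and duplicate keys, unrepresentable in a Python dict.
def Pre_analyzeCounterDictionary (dict : List (Int × Int)) : Prop :=
  dict ≠ [] ∧ (dict.map Prod.fst).Nodup ∧ ∃ kv ∈ dict, 0 < kv.2
instance (dict : List (Int × Int)) : Decidable (Pre_analyzeCounterDictionary dict) := by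
  unfold Pre_analyzeCounterDictionary; infer_instance
def pvWitness_analyzeCounterDictionary : (List (Int × Int)) := [(2, 3), (-1, 1)]
def Spec_analyzeCounterDictionary (dict : List (Int × Int)) (out : Int × Int × Int × Int) : Prop := out = analyzeCounterDictionary_alt dict
instance (dict : List (Int × Int)) (out : Int × Int × Int × Int) : Decidable (Spec_analyzeCounterDictionary dict out) := by unfold Spec_analyzeCounterDictionary; infer_instance

-- ===== CLAIM (what is proved, stated in full; the proofs are below) =====
def Claim_equal_analyzeCounterDictionary : Prop := ∀ (dict : List (Int × Int)), Dom_analyzeCounterDictionary dict → Pre_analyzeCounterDictionary dict → Spec_analyzeCounterDictionary dict (analyzeCounterDictionary dict)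

-- ===== LEMMAS AND PROOFS =====

-- B's mode component viewed as its own fold, used only by the proofs
def pvBmf (s : Int × Int) (kv : Int × Int) : Int × Int :=
  if kv.2 > s.2 then (kv.1, kv.2) else s

lemma pvMinStep (a k : Int) : (if k < a then k else a) = min a k := by
  rw [min_def]; split_ifs <;> omega

lemma pvMaxStep (a k : Int) : (if k > a then k else a) = max a k := by
  rw [max_def]; split_ifs <;> omega

-- the fused fold decomposes into the four independent reductions
lemma pvBfold_eq (l : List (Int × Int)) (mn mx mk mo tot : Int) :
    l.foldl pvBstep (mn, mx, mk, mo, tot) =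
      ((l.map Prod.fst).foldl min mn,
       (l.map Prod.fst).foldl max mx,
       (l.foldl pvBmf (mk, mo)).1,
       (l.foldl pvBmf (mk, mo)).2,
       tot + (l.map Prod.snd).sum) := by
  induction l generalizing mn mx mk mo tot with
  | nil => simp
  | cons kv t ih =>
      simp only [List.foldl, List.map, List.sum_cons]
      rw [show pvBstep (mn, mx, mk, mo, tot) kv =
            (min mn kv.1, max mx kv.1, (pvBmf (mk, mo) kv).1, (pvBmf (mk, mo) kv).2,
             tot + kv.2) from by
            simp [pvBstep, pvBmf, pvMinStep, pvMaxStep]]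
      rw [ih]
      have : (pvBmf (mk, mo) kv) = ((pvBmf (mk, mo) kv).1, (pvBmf (mk, mo) kv).2) := rfl
      rw [← this]
      ring_nf

-- once a positive mode has been recorded, the two mode folds run in lockstep
lemma pvMode_lock (l : List (Int × Int)) (mk mo : Int) :
    l.foldl pvAmf (some mk, mo) =
      (some (l.foldl pvBmf (mk, mo)).1, (l.foldl pvBmf (mk, mo)).2) := by
  induction l generalizing mk mo with
  | nil => rfl
  | cons kv t ih =>
      simp only [List.foldl, pvAmf, pvBmf]
      split_ifs <;> exact ih _ _

-- if some occurrence is positive, A's None-seeded mode fold agrees with B's fold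
-- seeded with any key and occurrence 0
lemma pvMode_rel (l : List (Int × Int)) (mk0 : Int) (h : ∃ kv ∈ l, 0 < kv.2) :
    l.foldl pvAmf (none, 0) =
      (some (l.foldl pvBmf (mk0, 0)).1, (l.foldl pvBmf (mk0, 0)).2) := by
  induction l generalizing mk0 with
  | nil => simp at h
  | cons kv t ih =>
      simp only [List.foldl, pvAmf, pvBmf]
      by_cases hpos : kv.2 > (0 : Int)
      · simp only [if_pos hpos]; exact pvMode_lock t kv.1 kv.2
      · simp only [if_neg hpos]
        apply ih
        rcases h with ⟨w, hw, hwpos⟩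
        rcases List.mem_cons.mp hw with rfl | hwt
        · omega
        · exact ⟨w, hwt, hwpos⟩

-- ===== VERDICT (by name: the statement is the Claim_ definition above) =====
theorem analyzeCounterDictionary_spec : Claim_equal_analyzeCounterDictionary := by
  intro dict _ hpre
  obtain ⟨hne, _, hex⟩ := hpre
  unfold Spec_analyzeCounterDictionary
  match dict, hne with
  | (first, v0) :: rest, _ =>
    unfold analyzeCounterDictionary analyzeCounterDictionary_alt
    have hkeys : ((first, v0) :: rest).map Prod.fst = first :: rest.map Prod.fst := rfl
    rw [hkeys, PySem.List.min?_id_cons, PySem.List.max?_id_cons]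
    dsimp only
    rw [pvBfold_eq, pvMode_rel _ first hex]
    simp [List.foldl, min_self, max_self]
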